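-- pv_equiv track=rewrite | github.com/aomond-imt/reconfiguration-esds | concerto_d_model/model_time_concerto_d.py | _compute_receive_periods_from_sending_periods
-- ===== SOURCE A (Python) =====
-- def _compute_receive_periods_from_sending_periods(sending_periods_per_node):
--     receive_periods_per_node = {node_id: [] for node_id in sending_periods_per_node.keys()}
--     for sender_id, sending_periods in sending_periods_per_node.items():
--         for receiver_id, start_send, end_send in sending_periods:
--             receive_periods_per_node[receiver_id].append([sender_id, start_send, end_send])
--
--     # Sort lists by start_send
--     for node_id, receive_periods in receive_periods_per_node.items():
--         receive_periods_per_node[node_id] = sorted(receive_periods, key=lambda period: period[1])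
--
--     return receive_periods_per_node
-- ===== SOURCE B (Python) =====
-- def _compute_receive_periods_from_sending_periods(sending_periods_per_node):
--     # sort-then-partition: one global stable sort over all sends, then a single
--     # distributing pass; each bucket comes out already sorted by start_send.
--     receive_periods_per_node = {node_id: [] for node_id in sending_periods_per_node}
--     all_sends = [(receiver_id, [sender_id, start_send, end_send])
--                  for sender_id, sending_periods in sending_periods_per_node.items()
--                  for receiver_id, start_send, end_send in sending_periods]
--     all_sends.sort(key=lambda t: t[1][1])
--     for receiver_id, period in all_sends:
--         receive_periods_per_node[receiver_id].append(period)
--     return receive_periods_per_node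
-- ===== Notes on version B (the rewrite author's own statement) =====
-- stated objective: alternative
-- what changed: A partitions sends into per-receiver buckets and then sorts each bucket; B flattens all sends, stable-sorts them once globally by start_send, and distributes them in one pass so every bucket is born sorted.
import Mathlib
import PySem

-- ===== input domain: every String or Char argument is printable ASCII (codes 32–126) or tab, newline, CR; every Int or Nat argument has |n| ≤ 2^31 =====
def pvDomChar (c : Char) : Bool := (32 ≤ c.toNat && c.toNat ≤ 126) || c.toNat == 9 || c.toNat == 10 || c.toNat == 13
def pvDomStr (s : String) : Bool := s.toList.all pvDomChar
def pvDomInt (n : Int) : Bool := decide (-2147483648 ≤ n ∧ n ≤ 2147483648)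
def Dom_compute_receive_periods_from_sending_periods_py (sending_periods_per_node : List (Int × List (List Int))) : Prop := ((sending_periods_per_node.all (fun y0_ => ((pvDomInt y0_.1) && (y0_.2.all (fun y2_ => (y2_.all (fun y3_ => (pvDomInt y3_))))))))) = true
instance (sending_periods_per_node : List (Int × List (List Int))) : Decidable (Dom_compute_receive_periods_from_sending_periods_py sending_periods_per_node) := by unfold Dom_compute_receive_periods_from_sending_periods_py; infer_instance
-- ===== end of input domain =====

-- B replaces A's partition-then-sort-each-bucket by one global stable sort of all
-- flattened sends followed by a single distributing pass (alternative decomposition,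
-- same asymptotic cost). Equivalence is about the return value.

-- ===== PORT A =====
-- literal transliteration of A: dict of empty buckets, nested append loop, then sort each bucket.
-- Tuple unpacking 'receiver_id, start_send, end_send = period' is ported as indexing with
-- List.getD; exact on Pre_ (period length 3), Python raises ValueError otherwise (excluded).
-- 'receive_periods_per_node[receiver_id].append(...)' is Dict.modify; exact when receiver_id
-- is a key (Pre_), Python raises KeyError otherwise (excluded).
def compute_receive_periods_from_sending_periods_py (sending_periods_per_node : List (Int × List (List Int))) : List (Int × List (List Int)) :=
  let recv0 : PySem.Dict Int (List (List Int)) :=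
    sending_periods_per_node.foldl (fun d p => d.insert p.1 []) PySem.Dict.empty
  let recv1 : PySem.Dict Int (List (List Int)) :=
    sending_periods_per_node.foldl (fun d p =>
      p.2.foldl (fun d per =>
        d.modify (per.getD 0 0) [] (fun v => v ++ [[p.1, per.getD 1 0, per.getD 2 0]])) d) recv0
  let final : PySem.Dict Int (List (List Int)) :=
    recv1.items.foldl (fun d q => d.insert q.1 (PySem.List.sorted q.2 (fun per => per.getD 1 0) false)) recv1
  final.items

-- ===== PORT B =====
-- literal transliteration of Source B: flatten all sends, one global stable sort by start_send,
-- then one distributing pass (same unpacking/indexing conventions as above, exact on Pre_).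
def compute_receive_periods_from_sending_periods_py_alt (sending_periods_per_node : List (Int × List (List Int))) : List (Int × List (List Int)) :=
  let result0 : PySem.Dict Int (List (List Int)) :=
    sending_periods_per_node.foldl (fun d p => d.insert p.1 []) PySem.Dict.empty
  let all_sends : List (Int × List Int) :=
    sending_periods_per_node.flatMap (fun p =>
      p.2.map (fun per => (per.getD 0 0, [p.1, per.getD 1 0, per.getD 2 0])))
  let sortedSends := PySem.List.sorted all_sends (fun t => t.2.getD 1 0) false
  (sortedSends.foldl (fun d t => d.modify t.1 [] (fun v => v ++ [t.2])) result0).items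

-- ===== PRECONDITION & SPEC =====
-- Pre_ excludes exactly the inputs where Python A raises: a sending period whose length is
-- not 3 (ValueError on unpacking) or whose receiver id is not a key of the dict (KeyError),
-- and association lists with duplicate keys, which do not represent a Python dict.
def Pre_compute_receive_periods_from_sending_periods_py (sending_periods_per_node : List (Int × List (List Int))) : Prop :=
  (sending_periods_per_node.map (fun p => p.1)).Nodup ∧
  ∀ p ∈ sending_periods_per_node, ∀ per ∈ p.2,
    per.length = 3 ∧ per.getD 0 0 ∈ sending_periods_per_node.map (fun p => p.1)
instance (sending_periods_per_node : List (Int × List (List Int))) : Decidable (Pre_compute_receive_periods_from_sending_periods_py sending_periods_per_node) := by unfold Pre_compute_receive_periods_from_sending_periods_py; infer_instance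
def pvWitness_compute_receive_periods_from_sending_periods_py : (List (Int × List (List Int))) := [(1, [[2, 4, 5], [2, 1, 3]]), (2, [[1, 0, 2]])]
def Spec_compute_receive_periods_from_sending_periods_py (sending_periods_per_node : List (Int × List (List Int))) (out : List (Int × List (List Int))) : Prop := out = compute_receive_periods_from_sending_periods_py_alt sending_periods_per_node
instance (sending_periods_per_node : List (Int × List (List Int))) (out : List (Int × List (List Int))) : Decidable (Spec_compute_receive_periods_from_sending_periods_py sending_periods_per_node out) := by unfold Spec_compute_receive_periods_from_sending_periods_py; infer_instance

-- ===== CLAIM (what is proved, stated in full; the proofs are below) =====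
def Claim_equal_compute_receive_periods_from_sending_periods_py : Prop := ∀ (sending_periods_per_node : List (Int × List (List Int))), Dom_compute_receive_periods_from_sending_periods_py sending_periods_per_node → Pre_compute_receive_periods_from_sending_periods_py sending_periods_per_node → Spec_compute_receive_periods_from_sending_periods_py sending_periods_per_node (compute_receive_periods_from_sending_periods_py sending_periods_per_node)

-- ===== LEMMAS AND PROOFS =====

-- the nested append loop of A, flattened to a single fold over (receiver, period) pairs
theorem pv_loopA (l : List (Int × List (List Int))) (d : PySem.Dict Int (List (List Int))) :
    l.foldl (fun d p =>
      p.2.foldl (fun d per =>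
        d.modify (per.getD 0 0) [] (fun v => v ++ [[p.1, per.getD 1 0, per.getD 2 0]])) d) d
    = (l.flatMap (fun p => p.2.map (fun per => (per.getD 0 0, [p.1, per.getD 1 0, per.getD 2 0])))).foldl
        (fun d q => d.modify q.1 [] (fun v => v ++ [q.2])) d := by
  induction l generalizing d with
  | nil => rfl
  | cons p tl ih =>
    simp only [List.foldl_cons, List.flatMap_cons, List.foldl_append, List.foldl_map]
    exact ih _

theorem pv_insertBy_cons_of_head {α : Type} (before : α → α → Bool) (x : α) (zs : List α)
    (h : ∀ z ∈ zs, before x z = true) :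
    PySem.List.insertBy before x zs = x :: zs := by
  cases zs with
  | nil => rfl
  | cons z zs => simp [PySem.List.insertBy, h z (List.mem_cons_self)]

theorem pv_insertBy_unfold {α : Type} (keyT : α → Int) (x y : α) (ys : List α) :
    PySem.List.insertBy (fun a b => decide (keyT a < keyT b)) x (y :: ys)
      = if keyT x < keyT y then x :: y :: ys
        else y :: PySem.List.insertBy (fun a b => decide (keyT a < keyT b)) x ys := by
  simp [PySem.List.insertBy]

theorem pv_insertBy_filter {α : Type} (keyT : α → Int) (p : α → Bool) (x : α) :
    ∀ ys : List α, ys.Pairwise (fun a b => keyT a ≤ keyT b) →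
    (PySem.List.insertBy (fun a b => decide (keyT a < keyT b)) x ys).filter p
      = if p x then PySem.List.insertBy (fun a b => decide (keyT a < keyT b)) x (ys.filter p)
        else ys.filter p := by
  intro ys
  induction ys with
  | nil => intro _; cases hx : p x <;> simp [PySem.List.insertBy, hx]
  | cons y ys ih =>
    intro hp
    have hys : ys.Pairwise (fun a b => keyT a ≤ keyT b) := hp.tail
    have hhead : ∀ b ∈ ys, keyT y ≤ keyT b := (List.pairwise_cons.mp hp).1
    rw [pv_insertBy_unfold]
    by_cases h1 : keyT x < keyT y
    · rw [if_pos h1]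
      cases hx : p x with
      | true =>
        have hall : ∀ z ∈ List.filter p (y :: ys), decide (keyT x < keyT z) = true := by
          intro z hz
          rcases List.mem_cons.mp (List.mem_of_mem_filter hz) with rfl | hzm
          · simpa using h1
          · simp only [decide_eq_true_eq]; exact lt_of_lt_of_le h1 (hhead z hzm)
        rw [if_pos rfl, pv_insertBy_cons_of_head _ _ _ hall]
        simp [hx]
      | false =>
        simp [hx]
    · rw [if_neg h1, List.filter_cons, ih hys]
      cases hx : p x <;> cases hy : p y <;>
        simp [hy, pv_insertBy_unfold, h1]

theorem pv_filter_sorted {α : Type} (keyT : α → Int) (p : α → Bool) (xs : List α) :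
    (PySem.List.sorted xs keyT false).filter p = PySem.List.sorted (xs.filter p) keyT false := by
  induction xs using List.reverseRecOn with
  | nil => simp [PySem.List.sorted_eq_foldl_insertBy]
  | append_singleton xs x ih =>
    rw [PySem.List.sorted_eq_foldl_insertBy, List.foldl_append, List.foldl_cons, List.foldl_nil,
        ← PySem.List.sorted_eq_foldl_insertBy]
    rw [pv_insertBy_filter keyT p x _ (PySem.List.sorted_pairwise xs keyT), ih]
    rw [List.filter_append]
    cases hx : p x with
    | true =>
      simp only [List.filter_cons, hx, List.filter_nil, if_true]
      rw [PySem.List.sorted_eq_foldl_insertBy (xs.filter p ++ [x]), List.foldl_append,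
          List.foldl_cons, List.foldl_nil, ← PySem.List.sorted_eq_foldl_insertBy]
    | false =>
      simp [hx]

theorem pv_insertBy_map {α β : Type} (f : α → β) (keyT : α → Int) (key : β → Int)
    (hk : ∀ a, key (f a) = keyT a) (x : α) (ys : List α) :
    (PySem.List.insertBy (fun a b => decide (keyT a < keyT b)) x ys).map f
      = PySem.List.insertBy (fun a b => decide (key a < key b)) (f x) (ys.map f) := by
  induction ys with
  | nil => rfl
  | cons y ys ih => by_cases h : keyT x < keyT y <;> simp [PySem.List.insertBy, hk, h, ih]

theorem pv_map_sorted {α β : Type} (f : α → β) (keyT : α → Int) (key : β → Int)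
    (hk : ∀ a, key (f a) = keyT a) (xs : List α) :
    (PySem.List.sorted xs keyT false).map f = PySem.List.sorted (xs.map f) key false := by
  induction xs using List.reverseRecOn with
  | nil => simp [PySem.List.sorted_eq_foldl_insertBy]
  | append_singleton xs x ih =>
    rw [PySem.List.sorted_eq_foldl_insertBy, List.foldl_append, List.foldl_cons, List.foldl_nil,
        ← PySem.List.sorted_eq_foldl_insertBy]
    rw [pv_insertBy_map f keyT key hk, ih, List.map_append, List.map_cons, List.map_nil]
    rw [PySem.List.sorted_eq_foldl_insertBy (xs.map f ++ [f x]), List.foldl_append,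
        List.foldl_cons, List.foldl_nil, ← PySem.List.sorted_eq_foldl_insertBy]

-- getD through a fold of inserts whose keys avoid k
theorem pv_getD_foldl_insert_not_mem {ν : Type} (F : List (List Int) → ν)
    (xs : List (Int × List (List Int))) (d : PySem.Dict Int ν) (k : Int) (c : ν)
    (h : k ∉ xs.map (fun q => q.1)) :
    (xs.foldl (fun a q => a.insert q.1 (F q.2)) d).getD k c = d.getD k c := by
  induction xs generalizing d with
  | nil => rfl
  | cons q xs ih =>
    simp only [List.map_cons, List.mem_cons, not_or] at h
    simp only [List.foldl_cons]
    rw [ih _ h.2, PySem.Dict.getD_insert_of_ne _ _ _ h.1]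

theorem pv_getD_foldl_insert_mem {ν : Type} (F : List (List Int) → ν)
    (xs : List (Int × List (List Int))) (d : PySem.Dict Int ν) (k : Int) (v : List (List Int)) (c : ν)
    (hnd : (xs.map (fun q => q.1)).Nodup) (hm : (k, v) ∈ xs) :
    (xs.foldl (fun a q => a.insert q.1 (F q.2)) d).getD k c = F v := by
  induction xs generalizing d with
  | nil => cases hm
  | cons q xs ih =>
    simp only [List.map_cons, List.nodup_cons] at hnd
    rcases List.mem_cons.mp hm with h | h
    · subst h
      simp only [List.foldl_cons]
      rw [pv_getD_foldl_insert_not_mem F xs _ _ _ hnd.1, PySem.Dict.getD_insert_self]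
    · exact ih _ hnd.2 h

theorem pv_set_update_self (s : PySem.Set Int) (xs : List Int) (h : ∀ x ∈ xs, x ∈ s) :
    PySem.Set.update s xs = s := by
  rw [PySem.Set.update_eq_append_filter]
  have : (PySem.Set.ofList xs).filter (fun y => !s.contains y) = [] := by
    rw [List.filter_eq_nil_iff]
    intro y hy
    have hymem : y ∈ s := h y ((PySem.Set.mem_ofList xs y).mp hy)
    simp [hymem]
  rw [this, List.append_nil]

-- re-inserting every key of a Nodup dict with transformed values maps the items
theorem pv_items_resort (d : PySem.Dict Int (List (List Int))) (F : List (List Int) → List (List Int))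
    (hnd : d.keys.Nodup) :
    (d.items.foldl (fun a q => a.insert q.1 (F q.2)) d).items
      = d.items.map (fun q => (q.1, F q.2)) := by
  set r := d.items.foldl (fun a q => a.insert q.1 (F q.2)) d with hr
  have hk : r.keys = d.keys := by
    rw [hr, PySem.Dict.keys_foldl_insert_key d.items (fun q => q.1) (fun _ q => F q.2) d]
    exact pv_set_update_self _ _ (fun x hx => hx)
  have hnd' : r.keys.Nodup := hk ▸ hnd
  have h2 : d.items = d.keys.map (fun k => (k, d.getD k [])) := PySem.Dict.items_eq_map_keys d hnd []
  rw [PySem.Dict.items_eq_map_keys r hnd' [], hk]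
  conv_rhs => rw [h2]
  rw [List.map_map]
  apply List.map_congr_left
  intro k hkm
  have hmem : (k, d.getD k []) ∈ d.items := by rw [h2]; exact List.mem_map.mpr ⟨k, hkm, rfl⟩
  have hxnd : (d.items.map (fun q => q.1)).Nodup := hnd
  have hg := pv_getD_foldl_insert_mem F d.items d k (d.getD k []) [] hxnd hmem
  simp only [Function.comp]
  rw [hr, hg]

-- ===== VERDICT (by name: the statement is the Claim_ definition above) =====
theorem compute_receive_periods_from_sending_periods_py_spec : Claim_equal_compute_receive_periods_from_sending_periods_py := by
  intro spn _ hpre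
  obtain ⟨hnd, hmem⟩ := hpre
  unfold Spec_compute_receive_periods_from_sending_periods_py
  unfold compute_receive_periods_from_sending_periods_py compute_receive_periods_from_sending_periods_py_alt
  simp only []
  rw [pv_loopA]
  -- shared notation
  set K := spn.map (fun p => p.1) with hK
  set flat := spn.flatMap (fun p => p.2.map (fun per => (per.getD 0 0, [p.1, per.getD 1 0, per.getD 2 0]))) with hflat
  set d0 := spn.foldl (fun d p => d.insert p.1 ([] : List (List Int))) PySem.Dict.empty with hd0
  have hd0items : d0.items = spn.map (fun p => (p.1, ([] : List (List Int)))) := by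
    rw [hd0]
    have := PySem.Dict.items_foldl_insert_fresh spn (fun p => p.1) (fun _ => ([] : List (List Int)))
      PySem.Dict.empty (fun a _ => PySem.Dict.contains_empty _) hnd
    simpa using this
  have hd0keys : d0.keys = K := by
    simp only [PySem.Dict.keys, hd0items, List.map_map, hK]
    rfl
  have hd0nd : d0.keys.Nodup := by rw [hd0keys]; exact hnd
  have hd0getD : ∀ k : Int, d0.getD k [] = [] := by
    intro k
    by_cases hk : k ∈ d0.keys
    · rw [hd0keys, hK] at hk
      obtain ⟨p, hp, hpk⟩ := List.mem_map.mp hk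
      have : (k, ([] : List (List Int))) ∈ d0.items := by
        rw [hd0items]; exact List.mem_map.mpr ⟨p, hp, by rw [hpk]⟩
      exact PySem.Dict.getD_of_mem_items d0 this hd0nd []
    · apply PySem.Dict.getD_of_not_contains
      cases hc : d0.contains k with
      | false => rfl
      | true => exact absurd ((PySem.Dict.contains_iff_mem_keys d0 k).mp hc) hk
  have hflatmem : ∀ q ∈ flat, q.1 ∈ K := by
    intro q hq
    rw [hflat] at hq
    obtain ⟨p, hp, hq2⟩ := List.mem_flatMap.mp hq
    obtain ⟨per, hper, rfl⟩ := List.mem_map.mp hq2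
    exact (hmem p hp per hper).2
  -- A side
  set recv1 := flat.foldl (fun d q => d.modify q.1 [] (fun v => v ++ [q.2])) d0 with hrecv1
  have hkeys1 : recv1.keys = K := by
    rw [hrecv1, PySem.Dict.keys_foldl_modify_key flat (fun q => q.1) [] (fun _ q v => v ++ [q.2]) d0,
        hd0keys]
    exact pv_set_update_self _ _ (fun x hx => by
      obtain ⟨q, hq, rfl⟩ := List.mem_map.mp hx
      exact hflatmem q hq)
  have hnd1 : recv1.keys.Nodup := by rw [hkeys1]; exact hnd
  have hgetD1 : ∀ k : Int, recv1.getD k [] = (flat.filter (fun q => q.1 == k)).map (fun q => q.2) := by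
    intro k
    rw [hrecv1, PySem.Dict.getD_foldl_modify_append, hd0getD, List.nil_append]
  rw [pv_items_resort recv1 (fun v => PySem.List.sorted v (fun per => per.getD 1 0) false) hnd1]
  rw [PySem.Dict.items_eq_map_keys recv1 hnd1 [], hkeys1, List.map_map]
  -- B side
  set sortedSends := PySem.List.sorted flat (fun t => t.2.getD 1 0) false with hss
  set recvB := sortedSends.foldl (fun d t => d.modify t.1 [] (fun v => v ++ [t.2])) d0 with hrecvB
  have hkeysB : recvB.keys = K := by
    rw [hrecvB, PySem.Dict.keys_foldl_modify_key sortedSends (fun t => t.1) [] (fun _ t v => v ++ [t.2]) d0,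
        hd0keys]
    exact pv_set_update_self _ _ (fun x hx => by
      obtain ⟨q, hq, rfl⟩ := List.mem_map.mp hx
      exact hflatmem q ((PySem.List.mem_sorted flat _ false q).mp hq))
  have hndB : recvB.keys.Nodup := by rw [hkeysB]; exact hnd
  have hgetDB : ∀ k : Int, recvB.getD k [] = (sortedSends.filter (fun q => q.1 == k)).map (fun q => q.2) := by
    intro k
    rw [hrecvB, PySem.Dict.getD_foldl_modify_append, hd0getD, List.nil_append]
  rw [PySem.Dict.items_eq_map_keys recvB hndB [], hkeysB]
  apply List.map_congr_left
  intro k hkm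
  simp only [Function.comp]
  rw [hgetD1 k, hgetDB k]
  -- core: filtering then sorting = sorting then filtering, then projecting
  rw [hss, pv_filter_sorted (fun t => t.2.getD 1 0) (fun q => q.1 == k) flat]
  rw [pv_map_sorted (fun q : Int × List Int => q.2) (fun t => t.2.getD 1 0)
      (fun per => per.getD 1 0) (fun a => rfl)]
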